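-- pv_equiv track=rewrite | github.com/samarthbharti217/Web-Scrapping-Selenium | Consolidated_Data.py | gen_combos
-- ===== SOURCE A (Python) =====
-- import itertools
--
-- def gen_combos(list):
--     combinations = []
--     for element in itertools.product(*list):
--         st = ''
--         for x in element:
--             st = st + x
--         combinations.append(st)
--     return combinations
-- ===== SOURCE B (Python) =====
-- def gen_combos(list):
--     result = ['']
--     for sublist in list:
--         result = [prefix + x for prefix in result for x in sublist]
--     return result
-- ===== Notes on version B (the rewrite author's own statement) =====
-- stated objective: simpler
-- what changed: Replaced itertools.product plus a per-tuple inner concatenation loop with a single fold that extends running prefix strings one sublist at a time, never materializing tuples.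
import Mathlib
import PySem

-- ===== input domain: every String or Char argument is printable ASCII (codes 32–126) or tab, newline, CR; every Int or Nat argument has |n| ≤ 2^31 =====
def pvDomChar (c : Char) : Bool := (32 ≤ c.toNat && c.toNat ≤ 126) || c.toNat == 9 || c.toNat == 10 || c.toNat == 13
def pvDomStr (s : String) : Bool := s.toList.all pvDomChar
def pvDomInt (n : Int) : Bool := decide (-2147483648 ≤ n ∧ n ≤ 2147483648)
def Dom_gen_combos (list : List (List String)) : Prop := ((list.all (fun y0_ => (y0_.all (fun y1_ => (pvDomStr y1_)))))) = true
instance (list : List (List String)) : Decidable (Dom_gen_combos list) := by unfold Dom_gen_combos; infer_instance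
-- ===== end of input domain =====

-- B replaces itertools.product + per-tuple join by a single pref-extending fold; same output, simpler decomposition.


-- ===== PORT A =====
-- itertools.product(*list): tuples in lexicographic order, leftmost factor varying slowest
def pyProduct (list : List (List String)) : List (List String) :=
  match list with
  | [] => [[]]
  | l :: ls => l.flatMap (fun x => (pyProduct ls).map (fun e => x :: e))

def gen_combos (list : List (List String)) : List String :=
  (pyProduct list).foldl (fun combinations element =>
    combinations ++ [element.foldl (fun st x => st ++ x) ""]) []

-- ===== PORT B =====
def gen_combos_alt (list : List (List String)) : List String :=
  list.foldl (fun result sublist =>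
    result.flatMap (fun pref => sublist.map (fun x => pref ++ x))) [""]

-- ===== PRECONDITION & SPEC =====
def Spec_gen_combos (list : List (List String)) (out : List String) : Prop := out = gen_combos_alt list
instance (list : List (List String)) (out : List String) : Decidable (Spec_gen_combos list out) := by unfold Spec_gen_combos; infer_instance

-- ===== CLAIM (what is proved, stated in full; the proofs are below) =====
def Claim_equal_gen_combos : Prop := ∀ (list : List (List String)), Dom_gen_combos list → Spec_gen_combos list (gen_combos list)

-- ===== LEMMAS AND PROOFS =====
lemma foldl_append_singleton {α β : Type} (f : α → β) (xs : List α) (c : List β) :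
    xs.foldl (fun acc e => acc ++ [f e]) c = c ++ xs.map f := by
  induction xs generalizing c with
  | nil => simp
  | cons x xs ih => simp [List.foldl, ih]

lemma alt_foldl_eq (ls : List (List String)) (acc : List String) :
    ls.foldl (fun result sublist =>
      result.flatMap (fun pref => sublist.map (fun x => pref ++ x))) acc
    = acc.flatMap (fun p => (pyProduct ls).map (fun e => e.foldl (fun st x => st ++ x) p)) := by
  induction ls generalizing acc with
  | nil => simp [pyProduct]
  | cons l rest ih =>
      simp only [List.foldl, ih, pyProduct, List.flatMap_assoc, List.map_flatMap,
        List.flatMap_map, List.map_map]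
      simp [Function.comp_def, List.foldl]

-- ===== VERDICT (by name: the statement is the Claim_ definition above) =====
theorem gen_combos_spec : Claim_equal_gen_combos := by
  intro list _
  unfold Spec_gen_combos gen_combos gen_combos_alt
  rw [foldl_append_singleton, alt_foldl_eq]
  simp
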